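-- pv_equiv track=rewrite | github.com/Pydare/Algorithm-Problems | codeforces/prime_subtraction.py | primeSub
-- ===== SOURCE A (Python) =====
-- def primeSub(x,y):
--     n = [2,3,5,7,11,13,17,19,23,29,31,37,41,43,47]
--     p = (x-y)
--     init = 'NO'
--     for i in range(len(n)):
--         if p % n[i] == 0:
--             init = 'YES'
--             return('YES')
--             break
--         elif p % n[i] != 0:
--             init = 'NO'
--     if init == 'NO' and init != 'YES':
--         return('NO')
-- ===== SOURCE B (Python) =====
-- def primeSub(x, y):
--     # gcd of |x-y| with the primorial of 47 (product of the 15 primes) in one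
--     # Euclid loop, instead of testing each prime's remainder.
--     M = 614889782588491410  # 2*3*5*7*11*13*17*19*23*29*31*37*41*43*47
--     a = abs(x - y)
--     while M:
--         a, M = M, a % M
--     return 'YES' if a > 1 else 'NO'
-- ===== Notes on version B (the rewrite author's own statement) =====
-- stated objective: simpler
-- what changed: Replaces the per-prime remainder loop by a single Euclidean gcd of |x-y| with the precomputed product of the 15 primes, answering YES iff the gcd exceeds 1.
import Mathlib
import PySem

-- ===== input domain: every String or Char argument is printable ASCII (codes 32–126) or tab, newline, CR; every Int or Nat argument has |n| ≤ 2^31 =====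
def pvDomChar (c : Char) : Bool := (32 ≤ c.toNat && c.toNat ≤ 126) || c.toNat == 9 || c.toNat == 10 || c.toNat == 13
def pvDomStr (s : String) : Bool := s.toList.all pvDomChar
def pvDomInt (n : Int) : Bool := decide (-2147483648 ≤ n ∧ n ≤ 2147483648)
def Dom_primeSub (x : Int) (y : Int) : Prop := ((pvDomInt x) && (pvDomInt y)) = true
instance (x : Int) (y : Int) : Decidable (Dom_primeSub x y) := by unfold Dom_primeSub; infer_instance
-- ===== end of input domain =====

-- B replaces the 15 per-prime remainder tests by one Euclidean gcd of |x-y|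
-- with the precomputed product of those primes (objective: simpler).

-- ===== PORT A =====
-- A's for-loop over the prime list, carrying `init`; the 'YES' branch returns early.
-- On loop exhaustion `init` is always "NO" (the loop only ever re-assigns "NO"), so the
-- final `if init == 'NO' and init != 'YES'` is taken; the Python else-branch (fall off,
-- None) is unreachable and ported as "NO" only to keep the type `String`.
def primeSubLoop (p : Int) (init : String) : List Int → String
  | [] => if init == "NO" && !(init == "YES") then "NO" else "NO"
  | q :: rest =>
    if PySem.Int.mod p q == 0 then "YES"
    else primeSubLoop p "NO" rest

def primeSub (x : Int) (y : Int) : String :=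
  primeSubLoop (x - y) "NO" [2, 3, 5, 7, 11, 13, 17, 19, 23, 29, 31, 37, 41, 43, 47]

-- ===== PORT B =====
-- Source B's hand-written Euclid loop `while M: a, M = M, a % M` (a, M ≥ 0).
def euclidB (a : Nat) : Nat → Nat
  | 0 => a
  | (m + 1) => euclidB (m + 1) (a % (m + 1))
decreasing_by exact Nat.mod_lt _ (Nat.succ_pos m)

def primeSub_alt (x : Int) (y : Int) : String :=
  let a := (x - y).natAbs
  let g := euclidB a 614889782588491410
  if 1 < g then "YES" else "NO"

-- ===== PRECONDITION & SPEC =====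
def Spec_primeSub (x : Int) (y : Int) (out : String) : Prop := out = primeSub_alt x y
instance (x : Int) (y : Int) (out : String) : Decidable (Spec_primeSub x y out) := by unfold Spec_primeSub; infer_instance

-- ===== CLAIM (what is proved, stated in full; the proofs are below) =====
def Claim_equal_primeSub : Prop := ∀ (x : Int) (y : Int), Dom_primeSub x y → Spec_primeSub x y (primeSub x y)

-- ===== LEMMAS AND PROOFS =====

-- Source B's Euclid loop computes Nat.gcd with swapped arguments.
theorem euclidB_eq_gcd (a b : Nat) : euclidB a b = Nat.gcd b a := by
  induction b using Nat.strong_induction_on generalizing a with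
  | _ b ih =>
    match b with
    | 0 => simp [euclidB]
    | (m + 1) =>
      rw [euclidB, ih (a % (m + 1)) (Nat.mod_lt _ (Nat.succ_pos m))]
      exact (Nat.gcd_rec _ _).symm

theorem cop_prime (n q : Nat) (hq : q.Prime) : Nat.Coprime n q ↔ ¬ q ∣ n :=
  Nat.coprime_comm.trans hq.coprime_iff_not_dvd

-- gcd with the primorial exceeds 1 iff one of the 15 primes divides n.
theorem gcd_primorial_gt_one (n : Nat) :
    1 < Nat.gcd n 614889782588491410 ↔
      (2 ∣ n ∨ 3 ∣ n ∨ 5 ∣ n ∨ 7 ∣ n ∨ 11 ∣ n ∨ 13 ∣ n ∨ 17 ∣ n ∨ 19 ∣ n ∨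
       23 ∣ n ∨ 29 ∣ n ∨ 31 ∣ n ∨ 37 ∣ n ∨ 41 ∣ n ∨ 43 ∣ n ∨ 47 ∣ n) := by
  have hM : (614889782588491410 : Nat) =
      2 * (3 * (5 * (7 * (11 * (13 * (17 * (19 * (23 * (29 * (31 * (37 * (41 * (43 * 47))))))))))))) := by norm_num
  have hpos : 0 < Nat.gcd n 614889782588491410 :=
    Nat.gcd_pos_of_pos_right n (by norm_num)
  have hne : 1 < Nat.gcd n 614889782588491410 ↔ ¬ Nat.Coprime n 614889782588491410 := by
    unfold Nat.Coprime; omega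
  rw [hne, hM]
  simp only [Nat.coprime_mul_iff_right,
    cop_prime n 2 (by norm_num), cop_prime n 3 (by norm_num), cop_prime n 5 (by norm_num),
    cop_prime n 7 (by norm_num), cop_prime n 11 (by norm_num), cop_prime n 13 (by norm_num),
    cop_prime n 17 (by norm_num), cop_prime n 19 (by norm_num), cop_prime n 23 (by norm_num),
    cop_prime n 29 (by norm_num), cop_prime n 31 (by norm_num), cop_prime n 37 (by norm_num),
    cop_prime n 41 (by norm_num), cop_prime n 43 (by norm_num), cop_prime n 47 (by norm_num)]
  tauto

theorem primeSub_spec : Claim_equal_primeSub := by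
  unfold Claim_equal_primeSub
  intro x y _
  unfold Spec_primeSub primeSub primeSub_alt
  show primeSubLoop (x - y) "NO" [2, 3, 5, 7, 11, 13, 17, 19, 23, 29, 31, 37, 41, 43, 47] =
    if 1 < euclidB (x - y).natAbs 614889782588491410 then "YES" else "NO"
  set p := x - y with hp
  have loop : ∀ (l : List Int), primeSubLoop p "NO" l =
      if l.any (fun q => PySem.Int.mod p q == 0) then "YES" else "NO" := by
    intro l
    induction l with
    | nil => simp [primeSubLoop]
    | cons q rest ih =>
      rw [primeSubLoop, ih, List.any_cons]
      by_cases h : (PySem.Int.mod p q == 0) = true <;> simp [h]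
  rw [loop, euclidB_eq_gcd, Nat.gcd_comm]
  have hc : ([2, 3, 5, 7, 11, 13, 17, 19, 23, 29, 31, 37, 41, 43, 47].any
      (fun q => PySem.Int.mod p q == 0) = true) ↔
      1 < Nat.gcd p.natAbs 614889782588491410 := by
    rw [gcd_primorial_gt_one]
    simp only [List.any_cons, List.any_nil, Bool.or_eq_true, beq_iff_eq,
      PySem.Int.mod_eq_zero_iff_dvd, ← Int.natAbs_dvd_natAbs]
    norm_num
  simp only [hc]
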